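-- pv_equiv track=rewrite | github.com/XenoThanBird/Portfolio | 10_ai_sentinel_cybersecurity/network_mapper/device_fingerprint.py | fingerprint_os
-- ===== SOURCE A (Python) =====
-- TTL_FINGERPRINTS = {
--     (60, 65): "Linux/Android",
--     (120, 130): "Windows",
--     (250, 256): "Cisco/Network Device",
--     (30, 35): "Older Linux",
-- }
--
-- def fingerprint_os(ttl: int = 0, open_ports: list = None) -> str:
--     """
--     Guess the operating system based on TTL and open port heuristics.
--
--     TTL fingerprinting: different OSes use different initial TTL values.
--     Port heuristics: certain port combinations are characteristic of
--     specific OS types.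
--     """
--     guesses = []
--
--     # TTL-based guess
--     if ttl > 0:
--         for (low, high), os_name in TTL_FINGERPRINTS.items():
--             if low <= ttl <= high:
--                 guesses.append(os_name)
--                 break
--
--     # Port-based heuristics
--     if open_ports:
--         port_nums = {p.port if hasattr(p, "port") else p for p in open_ports}
--
--         if 3389 in port_nums:
--             guesses.append("Windows (RDP)")
--         elif 445 in port_nums and 135 in port_nums:
--             guesses.append("Windows (SMB+RPC)")
--
--         if 22 in port_nums and 3389 not in port_nums:
--             if 80 in port_nums or 443 in port_nums:
--                 guesses.append("Linux Server")
--
--         if 548 in port_nums: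
--             guesses.append("macOS (AFP)")
--         if 5353 in port_nums:
--             guesses.append("macOS/Linux (mDNS)")
--
--         if 80 in port_nums and len(port_nums) == 1:
--             guesses.append("IoT/Embedded Device")
--
--     if guesses:
--         return guesses[0]
--     return "Unknown"
-- ===== SOURCE B (Python) =====
-- _TTL_LOW = [30, 60, 120, 250]
-- _TTL_HIGH = [35, 65, 130, 256]
-- _TTL_OS = ["Older Linux", "Linux/Android", "Windows", "Cisco/Network Device"]
--
--
-- def fingerprint_os(ttl: int = 0, open_ports: list = None) -> str:
--     # Binary search a sorted TTL table instead of scanning a dict of ranges.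
--     if ttl > 0:
--         lo, hi = 0, len(_TTL_LOW)
--         while lo < hi:
--             mid = (lo + hi) // 2
--             if _TTL_LOW[mid] <= ttl:
--                 lo = mid + 1
--             else:
--                 hi = mid
--         if lo > 0 and ttl <= _TTL_HIGH[lo - 1]:
--             return _TTL_OS[lo - 1]
--     # One pass over the ports extracting boolean features, then decide.
--     if open_ports:
--         rdp = smb445 = rpc135 = ssh = http = https = afp = mdns = False
--         only80 = True
--         for p in open_ports:
--             v = p.port if hasattr(p, "port") else p
--             rdp = rdp or v == 3389
--             smb445 = smb445 or v == 445
--             rpc135 = rpc135 or v == 135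
--             ssh = ssh or v == 22
--             http = http or v == 80
--             https = https or v == 443
--             afp = afp or v == 548
--             mdns = mdns or v == 5353
--             only80 = only80 and v == 80
--         if rdp:
--             return "Windows (RDP)"
--         if smb445 and rpc135:
--             return "Windows (SMB+RPC)"
--         if ssh and (http or https):
--             return "Linux Server"
--         if afp:
--             return "macOS (AFP)"
--         if mdns:
--             return "macOS/Linux (mDNS)"
--         if http and only80:
--             return "IoT/Embedded Device"
--     return "Unknown"
-- ===== Notes on version B (the rewrite author's own statement) =====
-- stated objective: alternative
-- what changed: TTL is classified by binary search over a sorted boundary table instead of scanning the fingerprint dict, and the port heuristics are decided from boolean features (per-port flags and an only-80 flag) extracted in a single pass over the port list instead of building a set and querying it repeatedly; the guesses-list accumulation with guesses[0] becomes direct returns.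
import Mathlib
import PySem

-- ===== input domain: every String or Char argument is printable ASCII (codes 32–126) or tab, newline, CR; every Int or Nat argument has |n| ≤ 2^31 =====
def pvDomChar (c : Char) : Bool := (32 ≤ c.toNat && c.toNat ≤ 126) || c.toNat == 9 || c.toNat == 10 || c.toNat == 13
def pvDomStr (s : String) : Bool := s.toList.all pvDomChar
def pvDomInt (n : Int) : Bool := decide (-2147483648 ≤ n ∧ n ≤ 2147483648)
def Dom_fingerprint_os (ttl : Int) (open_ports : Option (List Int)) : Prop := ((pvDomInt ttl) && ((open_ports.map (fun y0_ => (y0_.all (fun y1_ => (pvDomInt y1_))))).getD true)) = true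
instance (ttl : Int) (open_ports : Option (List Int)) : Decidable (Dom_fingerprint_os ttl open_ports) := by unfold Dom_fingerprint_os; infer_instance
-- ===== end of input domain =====

-- B replaces A's guesses-list + dict scan + port set with a binary search over a sorted TTL
-- table and a single feature-extracting pass over the port list — an alternative decomposition.

-- ===== PORT A =====
def pvTTL_FINGERPRINTS : List ((Int × Int) × String) :=
  [((60, 65), "Linux/Android"),
   ((120, 130), "Windows"),
   ((250, 256), "Cisco/Network Device"),
   ((30, 35), "Older Linux")]

def fingerprint_os (ttl : Int) (open_ports : Option (List Int)) : String :=
  let guesses : List String := []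
  -- TTL-based guess: loop with break = first matching entry
  let guesses :=
    if ttl > 0 then
      match pvTTL_FINGERPRINTS.find? (fun p => decide (p.1.1 ≤ ttl ∧ ttl ≤ p.1.2)) with
      | some p => guesses ++ [p.2]
      | none => guesses
    else guesses
  -- Port-based heuristics
  let guesses :=
    match open_ports with
    | none => guesses
    | some ports =>
      if ports.isEmpty then guesses
      else
        let port_nums : PySem.Set Int := PySem.Set.ofList ports
        let guesses :=
          if PySem.Set.contains port_nums 3389 then guesses ++ ["Windows (RDP)"]
          else if PySem.Set.contains port_nums 445 && PySem.Set.contains port_nums 135 then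
            guesses ++ ["Windows (SMB+RPC)"]
          else guesses
        let guesses :=
          if PySem.Set.contains port_nums 22 && !PySem.Set.contains port_nums 3389 then
            if PySem.Set.contains port_nums 80 || PySem.Set.contains port_nums 443 then
              guesses ++ ["Linux Server"]
            else guesses
          else guesses
        let guesses :=
          if PySem.Set.contains port_nums 548 then guesses ++ ["macOS (AFP)"] else guesses
        let guesses :=
          if PySem.Set.contains port_nums 5353 then guesses ++ ["macOS/Linux (mDNS)"] else guesses
        let guesses :=
          if PySem.Set.contains port_nums 80 && PySem.Set.len port_nums == 1 then
            guesses ++ ["IoT/Embedded Device"]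
          else guesses
        guesses
  match guesses with
  | g :: _ => g
  | [] => "Unknown"

-- ===== PORT B =====
def pvTTL_LOW : List Int := [30, 60, 120, 250]
def pvTTL_HIGH : List Int := [35, 65, 130, 256]
def pvTTL_OS : List String := ["Older Linux", "Linux/Android", "Windows", "Cisco/Network Device"]

-- the `while lo < hi` binary-search loop of Source B
def pvBsearch (ttl : Int) (lo hi : Nat) : Nat :=
  if lo < hi then
    if pvTTL_LOW.getD ((lo + hi) / 2) 0 ≤ ttl then pvBsearch ttl ((lo + hi) / 2 + 1) hi
    else pvBsearch ttl lo ((lo + hi) / 2)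
  else lo
termination_by hi - lo
decreasing_by all_goals omega

-- the boolean feature variables of Source B's single pass
structure PvFlags where
  rdp : Bool
  smb445 : Bool
  rpc135 : Bool
  ssh : Bool
  http : Bool
  https : Bool
  afp : Bool
  mdns : Bool
  only80 : Bool
deriving Repr, DecidableEq

def pvStep (f : PvFlags) (v : Int) : PvFlags :=
  { rdp := f.rdp || v == 3389,
    smb445 := f.smb445 || v == 445,
    rpc135 := f.rpc135 || v == 135,
    ssh := f.ssh || v == 22,
    http := f.http || v == 80,
    https := f.https || v == 443,
    afp := f.afp || v == 548,
    mdns := f.mdns || v == 5353,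
    only80 := f.only80 && v == 80 }

def pvInitFlags : PvFlags :=
  ⟨false, false, false, false, false, false, false, false, true⟩

def pvPortGuess (open_ports : Option (List Int)) : String :=
  match open_ports with
  | none => "Unknown"
  | some ports =>
    if ports.isEmpty then "Unknown"
    else
      let f := ports.foldl pvStep pvInitFlags
      if f.rdp then "Windows (RDP)"
      else if f.smb445 && f.rpc135 then "Windows (SMB+RPC)"
      else if f.ssh && (f.http || f.https) then "Linux Server"
      else if f.afp then "macOS (AFP)"
      else if f.mdns then "macOS/Linux (mDNS)"
      else if f.http && f.only80 then "IoT/Embedded Device"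
      else "Unknown"

def fingerprint_os_alt (ttl : Int) (open_ports : Option (List Int)) : String :=
  if ttl > 0 then
    let lo := pvBsearch ttl 0 4
    if 0 < lo ∧ ttl ≤ pvTTL_HIGH.getD (lo - 1) 0 then pvTTL_OS.getD (lo - 1) ""
    else pvPortGuess open_ports
  else pvPortGuess open_ports

-- ===== PRECONDITION & SPEC =====
def Spec_fingerprint_os (ttl : Int) (open_ports : Option (List Int)) (out : String) : Prop := out = fingerprint_os_alt ttl open_ports
instance (ttl : Int) (open_ports : Option (List Int)) (out : String) : Decidable (Spec_fingerprint_os ttl open_ports out) := by unfold Spec_fingerprint_os; infer_instance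

-- ===== CLAIM (what is proved, stated in full; the proofs are below) =====
def Claim_equal_fingerprint_os : Prop := ∀ (ttl : Int) (open_ports : Option (List Int)), Dom_fingerprint_os ttl open_ports → Spec_fingerprint_os ttl open_ports (fingerprint_os ttl open_ports)

-- ===== LEMMAS AND PROOFS =====



-- set membership = list membership
theorem contains_ofList_eq (ports : List Int) (x : Int) :
    PySem.Set.contains (PySem.Set.ofList ports) x = ports.contains x := by
  simp [PySem.Set.contains_eq_listContains, PySem.Set.mem_ofList]

-- the IoT condition: 80 in the set and the set has one element  =  every port is 80 (ports nonempty)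
theorem iot_cond (ports : List Int) (h : ports ≠ []) :
    (ports.contains 80 && PySem.Set.len (PySem.Set.ofList ports) == 1) = ports.all (· == 80) := by
  by_cases hall : ∀ x ∈ ports, x = 80
  · have h80 : (80 : Int) ∈ ports := by
      cases ports with
      | nil => exact absurd rfl h
      | cons a l => exact (hall a (by simp)) ▸ List.mem_cons_self
    have hofl : PySem.Set.ofList ports = [80] := by
      have nd := PySem.Set.nodup_ofList ports
      have hm : ∀ x, x ∈ PySem.Set.ofList ports ↔ x = 80 := by
        intro x
        constructor
        · intro hx; exact hall x ((PySem.Set.mem_ofList ports x).mp hx)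
        · intro hx; exact hx ▸ (PySem.Set.mem_ofList ports 80).mpr h80
      cases hl : PySem.Set.ofList ports with
      | nil =>
          have := (PySem.Set.mem_ofList ports 80).mpr h80
          rw [hl] at this; simp at this
      | cons a t =>
          have ha : a = 80 := (hm a).mp (hl ▸ List.mem_cons_self)
          have ht : t = [] := by
            cases t with
            | nil => rfl
            | cons b u =>
                have hb : b = 80 := (hm b).mp (hl ▸ (by simp))
                rw [hl] at nd
                have : a ∉ (b :: u) := (List.nodup_cons.mp nd).1
                exact absurd (by simp [ha, hb]) this
          simp [ha, ht]
    simp [PySem.Set.len, hofl, h80, List.all_eq_true]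
    intro x hx; simpa using hall x hx
  · push Not at hall
    obtain ⟨b, hb, hb80⟩ := hall
    have hr : ports.all (· == 80) = false := by
      simp; exact ⟨b, hb, by simpa using hb80⟩
    rw [hr]
    by_cases h80 : (80 : Int) ∈ ports
    · have hm80 := (PySem.Set.mem_ofList ports 80).mpr h80
      have hmb := (PySem.Set.mem_ofList ports b).mpr hb
      have hlen : (PySem.Set.ofList ports).length ≠ 1 := by
        intro hl
        obtain ⟨a, ha⟩ := List.length_eq_one_iff.mp hl
        rw [ha] at hm80 hmb
        simp at hm80 hmb
        exact hb80 (by rw [hmb, hm80])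
      simp [PySem.Set.len, hlen]
    · simp [h80]


-- Int == vs decide of flipped equality (bridges BEq and list membership forms)
theorem int_beq_decide (a b : Int) : (a == b) = decide (b = a) := by
  rcases eq_or_ne a b with h | h
  · simp [h]
  · simp [h, Ne.symm h]

theorem foldl_rdp (l : List Int) (f : PvFlags) :
    (l.foldl pvStep f).rdp = (f.rdp || l.contains 3389) := by
  induction l generalizing f with
  | nil => simp
  | cons a t ih => simp [pvStep, ih, Bool.or_assoc, int_beq_decide]

theorem foldl_smb445 (l : List Int) (f : PvFlags) :
    (l.foldl pvStep f).smb445 = (f.smb445 || l.contains 445) := by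
  induction l generalizing f with
  | nil => simp
  | cons a t ih => simp [pvStep, ih, Bool.or_assoc, int_beq_decide]

theorem foldl_rpc135 (l : List Int) (f : PvFlags) :
    (l.foldl pvStep f).rpc135 = (f.rpc135 || l.contains 135) := by
  induction l generalizing f with
  | nil => simp
  | cons a t ih => simp [pvStep, ih, Bool.or_assoc, int_beq_decide]

theorem foldl_ssh (l : List Int) (f : PvFlags) :
    (l.foldl pvStep f).ssh = (f.ssh || l.contains 22) := by
  induction l generalizing f with
  | nil => simp
  | cons a t ih => simp [pvStep, ih, Bool.or_assoc, int_beq_decide]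

theorem foldl_http (l : List Int) (f : PvFlags) :
    (l.foldl pvStep f).http = (f.http || l.contains 80) := by
  induction l generalizing f with
  | nil => simp
  | cons a t ih => simp [pvStep, ih, Bool.or_assoc, int_beq_decide]

theorem foldl_https (l : List Int) (f : PvFlags) :
    (l.foldl pvStep f).https = (f.https || l.contains 443) := by
  induction l generalizing f with
  | nil => simp
  | cons a t ih => simp [pvStep, ih, Bool.or_assoc, int_beq_decide]

theorem foldl_afp (l : List Int) (f : PvFlags) :
    (l.foldl pvStep f).afp = (f.afp || l.contains 548) := by
  induction l generalizing f with
  | nil => simp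
  | cons a t ih => simp [pvStep, ih, Bool.or_assoc, int_beq_decide]

theorem foldl_mdns (l : List Int) (f : PvFlags) :
    (l.foldl pvStep f).mdns = (f.mdns || l.contains 5353) := by
  induction l generalizing f with
  | nil => simp
  | cons a t ih => simp [pvStep, ih, Bool.or_assoc, int_beq_decide]

theorem foldl_only80 (l : List Int) (f : PvFlags) :
    (l.foldl pvStep f).only80 = (f.only80 && l.all (· == 80)) := by
  induction l generalizing f with
  | nil => simp
  | cons a t ih => simp [pvStep, ih, Bool.and_assoc]

-- evaluation of the 4-entry binary search
theorem bsearch_eval (ttl : Int) :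
    pvBsearch ttl 0 4 =
      if 250 ≤ ttl then 4
      else if 120 ≤ ttl then 3
      else if 60 ≤ ttl then 2
      else if 30 ≤ ttl then 1
      else 0 := by
  have e04 : pvBsearch ttl 0 4 =
      if (120 : Int) ≤ ttl then pvBsearch ttl 3 4 else pvBsearch ttl 0 2 := by
    rw [pvBsearch.eq_def]; norm_num [pvTTL_LOW]
  have e34 : pvBsearch ttl 3 4 =
      if (250 : Int) ≤ ttl then pvBsearch ttl 4 4 else pvBsearch ttl 3 3 := by
    rw [pvBsearch.eq_def]; norm_num [pvTTL_LOW]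
  have e02 : pvBsearch ttl 0 2 =
      if (60 : Int) ≤ ttl then pvBsearch ttl 2 2 else pvBsearch ttl 0 1 := by
    rw [pvBsearch.eq_def]; norm_num [pvTTL_LOW]
  have e01 : pvBsearch ttl 0 1 =
      if (30 : Int) ≤ ttl then pvBsearch ttl 1 1 else pvBsearch ttl 0 0 := by
    rw [pvBsearch.eq_def]; norm_num [pvTTL_LOW]
  have stop : ∀ n, pvBsearch ttl n n = n := by
    intro n; rw [pvBsearch.eq_def]; simp
  simp only [e04, e34, e02, e01, stop]
  split_ifs <;> omega

-- on a nonempty list, "80 present AND all are 80" is just "all are 80"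
theorem http_only80 (ports : List Int) (h : ports ≠ []) :
    (ports.contains 80 && ports.all (· == 80)) = ports.all (· == 80) := by
  by_cases hall : ports.all (· == 80) = true
  · have h80 : (80 : Int) ∈ ports := by
      cases ports with
      | nil => exact absurd rfl h
      | cons a t =>
          have ha : a = 80 := by
            have := List.all_eq_true.mp hall a (by simp)
            simpa using this
          simp [ha]
    simp [hall, h80]
  · simp [Bool.eq_false_iff.mpr hall]


-- the common decision chain over the nine boolean port features
def pvPortA (c1 c2 c3 c4 c5 c6 c7 c8 c9 : Bool) : String :=
  if c1 then "Windows (RDP)"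
  else if c2 && c3 then "Windows (SMB+RPC)"
  else if c4 && (c5 || c6) then "Linux Server"
  else if c7 then "macOS (AFP)"
  else if c8 then "macOS/Linux (mDNS)"
  else if c9 then "IoT/Embedded Device"
  else "Unknown"

-- A on a nonempty port list = TTL guess if any, else the port decision chain
theorem A_decomp (ttl : Int) (ports : List Int) (hports : ports ≠ []) :
    fingerprint_os ttl (some ports) =
      (match (if ttl > 0 then
                match pvTTL_FINGERPRINTS.find? (fun p => decide (p.1.1 ≤ ttl ∧ ttl ≤ p.1.2)) with
                | some p => [p.2]
                | none => ([] : List String)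
              else []) with
       | g :: _ => g
       | [] => pvPortA (ports.contains 3389) (ports.contains 445) (ports.contains 135)
                (ports.contains 22) (ports.contains 80) (ports.contains 443)
                (ports.contains 548) (ports.contains 5353) (ports.all (· == 80))) := by
  have hne : ¬ports.isEmpty = true := by simpa [List.isEmpty_iff] using hports
  unfold fingerprint_os pvPortA
  simp only [hne, if_false, Bool.false_eq_true, contains_ofList_eq, iot_cond ports hports,
    List.nil_append]
  generalize (if ttl > 0 then
      match pvTTL_FINGERPRINTS.find? (fun p => decide (p.1.1 ≤ ttl ∧ ttl ≤ p.1.2)) with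
      | some p => [p.2]
      | none => ([] : List String)
    else []) = g0
  generalize ports.contains 3389 = c1
  generalize ports.contains 445 = c2
  generalize ports.contains 135 = c3
  generalize ports.contains 22 = c4
  generalize ports.contains 80 = c5
  generalize ports.contains 443 = c6
  generalize ports.contains 548 = c7
  generalize ports.contains 5353 = c8
  generalize ports.all (· == 80) = c9
  cases g0 <;>
    cases c1 <;> cases c2 <;> cases c3 <;> cases c4 <;> cases c5 <;> cases c6 <;>
      cases c7 <;> cases c8 <;> cases c9 <;> rfl

-- B on a nonempty port list = TTL classification if any, else the same decision chain
theorem B_decomp (ttl : Int) (ports : List Int) (hports : ports ≠ []) :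
    fingerprint_os_alt ttl (some ports) =
      if 250 ≤ ttl ∧ ttl ≤ 256 then "Cisco/Network Device"
      else if 120 ≤ ttl ∧ ttl ≤ 130 then "Windows"
      else if 60 ≤ ttl ∧ ttl ≤ 65 then "Linux/Android"
      else if 30 ≤ ttl ∧ ttl ≤ 35 then "Older Linux"
      else pvPortA (ports.contains 3389) (ports.contains 445) (ports.contains 135)
             (ports.contains 22) (ports.contains 80) (ports.contains 443)
             (ports.contains 548) (ports.contains 5353) (ports.all (· == 80)) := by
  have hne : ¬ports.isEmpty = true := by simpa [List.isEmpty_iff] using hports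
  unfold fingerprint_os_alt pvPortGuess pvPortA
  simp only [hne, if_false, Bool.false_eq_true, bsearch_eval,
    foldl_rdp, foldl_smb445, foldl_rpc135, foldl_ssh, foldl_http, foldl_https,
    foldl_afp, foldl_mdns, foldl_only80, pvInitFlags, Bool.false_or, Bool.true_and]
  rw [http_only80 ports hports]
  by_cases t30 : (30 : Int) ≤ ttl <;> by_cases u35 : ttl ≤ 35 <;>
    by_cases t60 : (60 : Int) ≤ ttl <;> by_cases u65 : ttl ≤ 65 <;>
    by_cases t120 : (120 : Int) ≤ ttl <;> by_cases u130 : ttl ≤ 130 <;>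
    by_cases t250 : (250 : Int) ≤ ttl <;> by_cases u256 : ttl ≤ 256 <;>
    by_cases h0 : ttl > 0 <;>
    first
      | omega
      | simp [pvTTL_HIGH, pvTTL_OS, t30, u35, t60, u65, t120, u130, t250, u256, h0]

-- ===== VERDICT (by name: the statement is the Claim_ definition above) =====
theorem fingerprint_os_spec : Claim_equal_fingerprint_os := by
  intro ttl op _
  unfold Spec_fingerprint_os
  rcases op with _ | ports
  · by_cases t30 : (30 : Int) ≤ ttl <;> by_cases u35 : ttl ≤ 35 <;>
      by_cases t60 : (60 : Int) ≤ ttl <;> by_cases u65 : ttl ≤ 65 <;>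
      by_cases t120 : (120 : Int) ≤ ttl <;> by_cases u130 : ttl ≤ 130 <;>
      by_cases t250 : (250 : Int) ≤ ttl <;> by_cases u256 : ttl ≤ 256 <;>
      by_cases h0 : ttl > 0 <;>
      first
        | omega
        | simp [fingerprint_os, fingerprint_os_alt, pvPortGuess, pvTTL_FINGERPRINTS,
            List.find?, bsearch_eval, pvTTL_HIGH, pvTTL_OS,
            t30, u35, t60, u65, t120, u130, t250, u256, h0]
  · by_cases hne : ports.isEmpty
    · have hnil : ports = [] := by simpa [List.isEmpty_iff] using hne
      subst hnil
      by_cases t30 : (30 : Int) ≤ ttl <;> by_cases u35 : ttl ≤ 35 <;>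
        by_cases t60 : (60 : Int) ≤ ttl <;> by_cases u65 : ttl ≤ 65 <;>
        by_cases t120 : (120 : Int) ≤ ttl <;> by_cases u130 : ttl ≤ 130 <;>
        by_cases t250 : (250 : Int) ≤ ttl <;> by_cases u256 : ttl ≤ 256 <;>
        by_cases h0 : ttl > 0 <;>
        first
          | omega
          | simp [fingerprint_os, fingerprint_os_alt, pvPortGuess, pvTTL_FINGERPRINTS,
              List.find?, bsearch_eval, pvTTL_HIGH, pvTTL_OS,
              t30, u35, t60, u65, t120, u130, t250, u256, h0]
    · have hports : ports ≠ [] := by simpa [List.isEmpty_iff] using hne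
      rw [A_decomp ttl ports hports, B_decomp ttl ports hports]
      by_cases t30 : (30 : Int) ≤ ttl <;> by_cases u35 : ttl ≤ 35 <;>
        by_cases t60 : (60 : Int) ≤ ttl <;> by_cases u65 : ttl ≤ 65 <;>
        by_cases t120 : (120 : Int) ≤ ttl <;> by_cases u130 : ttl ≤ 130 <;>
        by_cases t250 : (250 : Int) ≤ ttl <;> by_cases u256 : ttl ≤ 256 <;>
        by_cases h0 : ttl > 0 <;>
        first
          | omega
          | simp [pvTTL_FINGERPRINTS, List.find?,
              t30, u35, t60, u65, t120, u130, t250, u256, h0]
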